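-- pv_equiv track=rewrite | github.com/MeKhani/model_graph2 | subgraph_genrator.py | _process_triples
-- ===== SOURCE A (Python) =====
-- from collections import defaultdict as ddict
-- from typing import Tuple, List, Dict, Any
--
-- def _process_triples(triples: List[List[int]], ent_type: Dict) -> Tuple[Dict, Dict, Dict, List, Dict]:
--     """Process triples: reindex entities and compute frequencies."""
--     ent_freq = ddict(int)
--     rel_freq = ddict(int)
--     ent_type_sub = ddict(int)
--     triples_reidx = []
--     ent_reidx = {}
--     entidx = 0
--
--     for h, r, t in triples:
--         h_idx = ent_reidx.setdefault(h, entidx)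
--         if h_idx == entidx:
--             ent_type_sub[entidx] = ent_type[h]
--             entidx += 1
--
--         t_idx = ent_reidx.setdefault(t, entidx)
--         if t_idx == entidx:
--             ent_type_sub[entidx] = ent_type[t]
--             entidx += 1
--
--         ent_freq[h_idx] += 1
--         ent_freq[t_idx] += 1
--         rel_freq[r] += 1
--         triples_reidx.append([h_idx, r, t_idx])
--
--     return ent_freq, rel_freq, ent_type_sub, triples_reidx, ent_reidx
-- ===== SOURCE B (Python) =====
-- from collections import defaultdict as ddict, Counter
-- from typing import Tuple, List, Dict
--
--
-- def _process_triples(triples: List[List[int]], ent_type: Dict) -> Tuple[Dict, Dict, Dict, List, Dict]: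
--     """Reindex entities and compute frequencies: build the first-appearance
--     reindex table once, then derive each output in its own simple pass."""
--     ents = list(dict.fromkeys(x for h, _, t in triples for x in (h, t)))
--     ent_reidx = {e: i for i, e in enumerate(ents)}
--     ent_type_sub = ddict(int)
--     for i, e in enumerate(ents):
--         ent_type_sub[i] = ent_type[e]
--     ent_freq = ddict(int, Counter(ent_reidx[x] for h, _, t in triples for x in (h, t)))
--     rel_freq = ddict(int, Counter(r for _, r, _ in triples))
--     triples_reidx = [[ent_reidx[h], r, ent_reidx[t]] for h, r, t in triples]
--     return ent_freq, rel_freq, ent_type_sub, triples_reidx, ent_reidx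
-- ===== Notes on version B (the rewrite author's own statement) =====
-- stated objective: alternative
-- what changed: Replaces A's single fused loop with mutable setdefault/counter state by a staged decomposition: build the first-appearance reindex table once via dict.fromkeys + enumerate, then derive ent_type_sub, both frequency dicts (collections.Counter) and the reindexed triples each in its own independent pass.
import Mathlib
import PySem

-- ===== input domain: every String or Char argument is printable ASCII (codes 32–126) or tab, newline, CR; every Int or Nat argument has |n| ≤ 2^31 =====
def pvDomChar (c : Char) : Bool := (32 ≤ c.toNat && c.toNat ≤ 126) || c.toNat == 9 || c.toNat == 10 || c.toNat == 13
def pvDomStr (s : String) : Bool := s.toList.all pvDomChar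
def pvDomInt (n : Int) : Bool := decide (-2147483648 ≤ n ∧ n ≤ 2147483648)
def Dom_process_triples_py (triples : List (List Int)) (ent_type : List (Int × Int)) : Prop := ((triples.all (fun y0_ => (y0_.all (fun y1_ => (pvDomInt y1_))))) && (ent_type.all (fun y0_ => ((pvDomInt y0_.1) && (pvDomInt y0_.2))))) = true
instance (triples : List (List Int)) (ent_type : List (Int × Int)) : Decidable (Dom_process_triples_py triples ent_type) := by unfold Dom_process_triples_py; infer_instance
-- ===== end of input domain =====

-- B replaces A's single fused loop by a staged decomposition (reindex table first,
-- then each output in its own pass); objective: alternative, same O(n) cost.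

-- ===== PORT A =====
-- literal transliteration of A's fused loop: one foldl over the triples carrying
-- (ent_freq, rel_freq, ent_type_sub, triples_reidx, ent_reidx, entidx)
def process_triples_py (triples : List (List Int)) (ent_type : List (Int × Int)) :
    (List (Int × Int)) × (List (Int × Int)) × (List (Int × Int)) × List (List Int) × (List (Int × Int)) :=
  let entTy : PySem.Dict Int Int := PySem.Dict.ofList ent_type
  let st := triples.foldl
    (fun (st : PySem.Dict Int Int × PySem.Dict Int Int × PySem.Dict Int Int × List (List Int) × PySem.Dict Int Int × Int) tr =>
      match tr with
      | [h, r, t] =>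
        let ef := st.1
        let rf := st.2.1
        let ets := st.2.2.1
        let trx := st.2.2.2.1
        let er := st.2.2.2.2.1
        let n := st.2.2.2.2.2
        -- h_idx = ent_reidx.setdefault(h, entidx); if fresh: record type, bump entidx
        let hIdx := er.getD h n
        let er := er.setdefault h n
        let ets := if hIdx = n then ets.insert n (entTy.getD h 0) else ets
        let n := if hIdx = n then n + 1 else n
        -- t_idx = ent_reidx.setdefault(t, entidx); if fresh: record type, bump entidx
        let tIdx := er.getD t n
        let er := er.setdefault t n
        let ets := if tIdx = n then ets.insert n (entTy.getD t 0) else ets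
        let n := if tIdx = n then n + 1 else n
        -- frequency updates and reindexed triple
        let ef := ef.modify hIdx 0 (· + 1)
        let ef := ef.modify tIdx 0 (· + 1)
        let rf := rf.modify r 0 (· + 1)
        (ef, rf, ets, trx ++ [[hIdx, r, tIdx]], er, n)
      | [] => st
      | _ => st)  -- unpacking 'h, r, t' raises in Python; excluded by Pre_
    (PySem.Dict.empty, PySem.Dict.empty, PySem.Dict.empty, [], PySem.Dict.empty, 0)
  (st.1.items, st.2.1.items, st.2.2.1.items, st.2.2.2.1, st.2.2.2.2.1.items)

-- ===== PORT B =====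
-- staged: first-appearance entity list (dict.fromkeys = PySem.List.dedup), reindex
-- table as a dict comprehension over enumerate, then counters and maps, one pass each.
-- Python's tuple unpacking 'h, _, t' is ported as fixed-position access (getD 0 / getD 1 /
-- getD 2): exact on Pre_, where every triple has length 3.
def process_triples_py_alt (triples : List (List Int)) (ent_type : List (Int × Int)) :
    (List (Int × Int)) × (List (Int × Int)) × (List (Int × Int)) × List (List Int) × (List (Int × Int)) :=
  let entTy : PySem.Dict Int Int := PySem.Dict.ofList ent_type
  let ents : List Int := PySem.List.dedup (triples.flatMap (fun tr => [tr.getD 0 0, tr.getD 2 0]))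
  let entReidx : PySem.Dict Int Int :=
    (PySem.List.enumerate ents 0).foldl (fun d p => d.insert p.2 p.1) PySem.Dict.empty
  let entTypeSub : PySem.Dict Int Int :=
    (PySem.List.enumerate ents 0).foldl (fun d p => d.insert p.1 (entTy.getD p.2 0)) PySem.Dict.empty
  let entFreq : PySem.Dict Int Int :=
    PySem.Dict.counter (triples.flatMap (fun tr =>
      [entReidx.getD (tr.getD 0 0) 0, entReidx.getD (tr.getD 2 0) 0]))
  let relFreq : PySem.Dict Int Int :=
    PySem.Dict.counter (triples.map (fun tr => tr.getD 1 0))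
  let triplesReidx : List (List Int) :=
    triples.map (fun tr => [entReidx.getD (tr.getD 0 0) 0, tr.getD 1 0, entReidx.getD (tr.getD 2 0) 0])
  (entFreq.items, relFreq.items, entTypeSub.items, triplesReidx, entReidx.items)

-- ===== PRECONDITION & SPEC =====
-- Pre_ excludes exactly the inputs where the Python A raises: a triple that is not a
-- 3-list (ValueError on unpacking) or a head/tail entity missing from ent_type (KeyError).
def Pre_process_triples_py (triples : List (List Int)) (ent_type : List (Int × Int)) : Prop :=
  ∀ tr ∈ triples, tr.length = 3 ∧ tr.getD 0 0 ∈ ent_type.map Prod.fst ∧ tr.getD 2 0 ∈ ent_type.map Prod.fst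
instance (triples : List (List Int)) (ent_type : List (Int × Int)) : Decidable (Pre_process_triples_py triples ent_type) := by unfold Pre_process_triples_py; infer_instance

def pvWitness_process_triples_py : List (List Int) × (List (Int × Int)) :=
  ([[1, 5, 2], [2, 6, 1], [1, 5, 1]], [(1, 7), (2, 8)])

def Spec_process_triples_py (triples : List (List Int)) (ent_type : List (Int × Int)) (out : (List (Int × Int)) × (List (Int × Int)) × (List (Int × Int)) × List (List Int) × (List (Int × Int))) : Prop := out = process_triples_py_alt triples ent_type
instance (triples : List (List Int)) (ent_type : List (Int × Int)) (out : (List (Int × Int)) × (List (Int × Int)) × (List (Int × Int)) × List (List Int) × (List (Int × Int))) : Decidable (Spec_process_triples_py triples ent_type out) := by unfold Spec_process_triples_py; infer_instance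

-- ===== CLAIM (what is proved, stated in full; the proofs are below) =====
def Claim_equal_process_triples_py : Prop := ∀ (triples : List (List Int)) (ent_type : List (Int × Int)), Dom_process_triples_py triples ent_type → Pre_process_triples_py triples ent_type → Spec_process_triples_py triples ent_type (process_triples_py triples ent_type)

-- ===== LEMMAS AND PROOFS =====

-- the head/tail occurrence sequence of the triples
def pvFlat (l : List (List Int)) : List Int :=
  l.flatMap (fun tr => [tr.getD 0 0, tr.getD 2 0])

-- entities in order of first appearance
def pvEnts (l : List (List Int)) : List Int := PySem.List.dedup (pvFlat l)

-- the reindex dict e ↦ position of e in s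
def pvReidx (s : List Int) : PySem.Dict Int Int :=
  (PySem.List.enumerate s 0).foldl (fun d p => d.insert p.2 p.1) PySem.Dict.empty

-- the ent_type_sub dict i ↦ ent_type[s[i]]
def pvTS (entTy : PySem.Dict Int Int) (s : List Int) : PySem.Dict Int Int :=
  (PySem.List.enumerate s 0).foldl (fun d p => d.insert p.1 (entTy.getD p.2 0)) PySem.Dict.empty

-- canonical value of A's loop state after processing l
def pvState (entTy : PySem.Dict Int Int) (l : List (List Int)) :
    PySem.Dict Int Int × PySem.Dict Int Int × PySem.Dict Int Int × List (List Int) × PySem.Dict Int Int × Int :=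
  let s := pvEnts l
  (PySem.Dict.counter ((pvFlat l).map (fun e => ((s.idxOf e : Int)))),
   PySem.Dict.counter (l.map (fun tr => tr.getD 1 0)),
   pvTS entTy s,
   l.map (fun tr => match tr with | [h, r, t] => [((s.idxOf h : Int)), r, ((s.idxOf t : Int))] | _ => []),
   pvReidx s,
   (s.length : Int))

theorem pv_enumerate_append_singleton (xs : List Int) (x : Int) (k : Int) :
    PySem.List.enumerate (xs ++ [x]) k = PySem.List.enumerate xs k ++ [((k + xs.length : Int), x)] := by
  induction xs generalizing k with
  | nil => simp [PySem.List.enumerate_cons, PySem.List.enumerate_nil]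
  | cons a xs ih =>
      simp [PySem.List.enumerate_cons, ih (k + 1)]
      ring_nf

theorem pv_mem_enumerate_idxOf (s : List Int) (e : Int) (k : Int) (he : e ∈ s) :
    ((k + (s.idxOf e : Int)), e) ∈ PySem.List.enumerate s k := by
  induction s generalizing k with
  | nil => cases he
  | cons a s ih =>
      rw [PySem.List.enumerate_cons]
      by_cases h : e = a
      · subst h; simp [List.idxOf_cons_self]
      · have hm : e ∈ s := by cases he with | head => exact absurd rfl h | tail _ h' => exact h'
        have h2 := ih (k + 1) hm
        have hidx : (a :: s).idxOf e = s.idxOf e + 1 := List.idxOf_cons_ne s (Ne.symm h)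
        rw [hidx]
        right
        have harith : k + ((s.idxOf e + 1 : Nat) : Int) = (k + 1) + (s.idxOf e : Int) := by push_cast; ring
        rw [harith]
        exact h2

theorem pv_idxOf_append_self (s : List Int) (e : Int) (h : e ∉ s) :
    (s ++ [e]).idxOf e = s.length := by
  induction s with
  | nil => simp
  | cons a s ih =>
      have hne : e ≠ a := fun hh => h (hh ▸ List.mem_cons_self ..)
      simp only [List.cons_append, List.idxOf_cons_ne _ (Ne.symm hne),
        ih (fun hm => h (List.mem_cons_of_mem _ hm)), List.length_cons]

theorem pv_items_pvReidx (s : List Int) (hs : s.Nodup) :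
    (pvReidx s).items = (PySem.List.enumerate s 0).map (fun p => (p.2, p.1)) := by
  unfold pvReidx
  have := PySem.Dict.items_foldl_insert_fresh (PySem.List.enumerate s 0)
    (fun p => p.2) (fun p => p.1) PySem.Dict.empty
    (by intro a _; rfl)
    (by rw [PySem.List.map_snd_enumerate]; exact hs)
  simpa using this

theorem pv_keys_pvReidx (s : List Int) (hs : s.Nodup) : (pvReidx s).keys = s := by
  show (pvReidx s).items.map (fun p => p.1) = s
  rw [pv_items_pvReidx s hs, List.map_map]
  exact PySem.List.map_snd_enumerate s 0

theorem pv_getD_pvReidx (s : List Int) (hs : s.Nodup) (e d : Int) :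
    (pvReidx s).getD e d = if e ∈ s then (s.idxOf e : Int) else d := by
  by_cases he : e ∈ s
  · rw [if_pos he]
    have hx := pv_mem_enumerate_idxOf s e 0 he
    have hmem : (e, (s.idxOf e : Int)) ∈ (pvReidx s).items := by
      rw [pv_items_pvReidx s hs]
      exact List.mem_map.mpr ⟨_, hx, by simp⟩
    have hk : (pvReidx s).keys.Nodup := by rw [pv_keys_pvReidx s hs]; exact hs
    exact PySem.Dict.getD_of_mem_items _ hmem hk d
  · rw [if_neg he]
    apply PySem.Dict.getD_of_not_contains
    have : ¬ ((pvReidx s).contains e = true) := by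
      rw [PySem.Dict.contains_iff_mem_keys, pv_keys_pvReidx s hs]; exact he
    exact Bool.not_eq_true _ ▸ (by simpa using this)

theorem pv_contains_pvReidx (s : List Int) (hs : s.Nodup) (e : Int) :
    (pvReidx s).contains e = decide (e ∈ s) := by
  by_cases he : e ∈ s
  · simp [he, (PySem.Dict.contains_iff_mem_keys _ _).mpr (by rw [pv_keys_pvReidx s hs]; exact he)]
  · simp only [he, decide_false]
    cases h : (pvReidx s).contains e with
    | false => rfl
    | true => exact absurd (pv_keys_pvReidx s hs ▸ (PySem.Dict.contains_iff_mem_keys _ _).mp h) he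

theorem pv_pvReidx_append (s : List Int) (x : Int) :
    pvReidx (s ++ [x]) = (pvReidx s).insert x (s.length : Int) := by
  unfold pvReidx
  rw [pv_enumerate_append_singleton s x 0, List.foldl_append]
  simp [List.foldl]

theorem pv_pvTS_append (entTy : PySem.Dict Int Int) (s : List Int) (x : Int) :
    pvTS entTy (s ++ [x]) = (pvTS entTy s).insert (s.length : Int) (entTy.getD x 0) := by
  unfold pvTS
  rw [pv_enumerate_append_singleton s x 0, List.foldl_append]
  simp [List.foldl]

theorem pv_idxOf_add (s : List Int) (x e : Int) (he : e ∈ s) :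
    (PySem.Set.add s x).idxOf e = s.idxOf e := by
  rw [PySem.Set.add_eq_ite]
  split
  · rfl
  · exact List.idxOf_append_of_mem he

theorem pv_ent_step (entTy : PySem.Dict Int Int) (s : List Int) (hs : s.Nodup) (e : Int) :
    (pvReidx s).getD e (s.length : Int) = ((PySem.Set.add s e).idxOf e : Int)
    ∧ (pvReidx s).setdefault e (s.length : Int) = pvReidx (PySem.Set.add s e)
    ∧ (if (pvReidx s).getD e (s.length : Int) = (s.length : Int)
        then (pvTS entTy s).insert (s.length : Int) (entTy.getD e 0) else pvTS entTy s)
      = pvTS entTy (PySem.Set.add s e)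
    ∧ (if (pvReidx s).getD e (s.length : Int) = (s.length : Int)
        then (s.length : Int) + 1 else (s.length : Int))
      = ((PySem.Set.add s e).length : Int) := by
  by_cases he : e ∈ s
  · have hadd : PySem.Set.add s e = s := PySem.Set.add_of_mem he
    have hget : (pvReidx s).getD e (s.length : Int) = (s.idxOf e : Int) := by
      rw [pv_getD_pvReidx s hs, if_pos he]
    have hlt : s.idxOf e < s.length := List.idxOf_lt_length_of_mem he
    have hne : ¬ ((pvReidx s).getD e (s.length : Int) = (s.length : Int)) := by
      rw [hget]; intro hc; omega
    refine ⟨by rw [hadd, hget], ?_, by rw [if_neg hne, hadd], by rw [if_neg hne, hadd]⟩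
    rw [hadd]
    exact PySem.Dict.setdefault_of_contains _ _ (by rw [pv_contains_pvReidx s hs]; simpa using he)
  · have hadd : PySem.Set.add s e = s ++ [e] := PySem.Set.add_of_not_mem he
    have hget : (pvReidx s).getD e (s.length : Int) = (s.length : Int) := by
      rw [pv_getD_pvReidx s hs, if_neg he]
    refine ⟨?_, ?_, by rw [if_pos hget, hadd, pv_pvTS_append], ?_⟩
    · rw [hget, hadd, pv_idxOf_append_self s e he]
    · rw [hadd, pv_pvReidx_append]
      exact PySem.Dict.setdefault_of_not_contains _ _ (by rw [pv_contains_pvReidx s hs]; simpa using he)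
    · rw [if_pos hget, hadd]; simp

theorem pv_flat_append (l : List (List Int)) (h r t : Int) :
    pvFlat (l ++ [[h, r, t]]) = pvFlat l ++ [h, t] := by
  simp [pvFlat, List.flatMap_append]

theorem pv_ents_append (l : List (List Int)) (h r t : Int) :
    pvEnts (l ++ [[h, r, t]]) = PySem.Set.add (PySem.Set.add (pvEnts l) h) t := by
  unfold pvEnts
  rw [PySem.List.dedup_eq_ofList, pv_flat_append,
    show pvFlat l ++ [h, t] = pvFlat l ++ [h] ++ [t] by simp,
    PySem.Set.ofList_append, PySem.Set.ofList_append,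
    PySem.Set.update_cons, PySem.Set.update_nil, PySem.Set.update_cons, PySem.Set.update_nil,
    PySem.List.dedup_eq_ofList]

theorem pv_head_mem_flat (l : List (List Int)) (a b c : Int) (h : [a, b, c] ∈ l) :
    a ∈ pvFlat l ∧ c ∈ pvFlat l :=
  ⟨List.mem_flatMap.mpr ⟨[a, b, c], h, by simp⟩,
   List.mem_flatMap.mpr ⟨[a, b, c], h, by simp⟩⟩

theorem pv_mem_ents (l : List (List Int)) (e : Int) (h : e ∈ pvFlat l) : e ∈ pvEnts l :=
  (PySem.List.mem_dedup _ _).mpr h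

theorem pv_idx_stable₂ (s : List Int) (h t e : Int) (he : e ∈ s) :
    (PySem.Set.add (PySem.Set.add s h) t).idxOf e = s.idxOf e := by
  rw [pv_idxOf_add _ _ _ ((PySem.Set.mem_add _ _ _).mpr (Or.inl he)), pv_idxOf_add _ _ _ he]

theorem pv_counter_append₂ (xs : List Int) (a b : Int) :
    PySem.Dict.counter (xs ++ [a, b])
      = ((PySem.Dict.counter xs).modify a 0 (· + 1)).modify b 0 (· + 1) := by
  rw [show xs ++ [a, b] = (xs ++ [a]) ++ [b] by simp,
    PySem.Dict.counter_append_singleton, PySem.Dict.counter_append_singleton]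

theorem pv_trx_congr (l : List (List Int)) (h3l : ∀ tr ∈ l, tr.length = 3) (s s' : List Int)
    (hidx : ∀ e ∈ pvFlat l, s'.idxOf e = s.idxOf e) :
    l.map (fun tr => match tr with
      | [h1, r1, t1] => [((s'.idxOf h1 : Nat) : Int), r1, ((s'.idxOf t1 : Nat) : Int)]
      | _ => ([] : List Int))
    = l.map (fun tr => match tr with
      | [h1, r1, t1] => [((s.idxOf h1 : Nat) : Int), r1, ((s.idxOf t1 : Nat) : Int)]
      | _ => ([] : List Int)) := by
  apply List.map_congr_left
  intro tr htr
  obtain ⟨a, b, c, rfl⟩ := List.length_eq_three.mp (h3l tr htr)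
  obtain ⟨ha, hc⟩ := pv_head_mem_flat l a b c htr
  show [((s'.idxOf a : Nat) : Int), b, ((s'.idxOf c : Nat) : Int)] = _
  rw [hidx a ha, hidx c hc]

theorem pv_invariant (entTy : PySem.Dict Int Int) (l : List (List Int))
    (h3 : ∀ tr ∈ l, tr.length = 3) :
    l.foldl
      (fun (st : PySem.Dict Int Int × PySem.Dict Int Int × PySem.Dict Int Int × List (List Int) × PySem.Dict Int Int × Int) tr =>
        match tr with
        | [h, r, t] =>
          let ef := st.1
          let rf := st.2.1
          let ets := st.2.2.1
          let trx := st.2.2.2.1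
          let er := st.2.2.2.2.1
          let n := st.2.2.2.2.2
          let hIdx := er.getD h n
          let er := er.setdefault h n
          let ets := if hIdx = n then ets.insert n (entTy.getD h 0) else ets
          let n := if hIdx = n then n + 1 else n
          let tIdx := er.getD t n
          let er := er.setdefault t n
          let ets := if tIdx = n then ets.insert n (entTy.getD t 0) else ets
          let n := if tIdx = n then n + 1 else n
          let ef := ef.modify hIdx 0 (· + 1)
          let ef := ef.modify tIdx 0 (· + 1)
          let rf := rf.modify r 0 (· + 1)
          (ef, rf, ets, trx ++ [[hIdx, r, tIdx]], er, n)
        | [] => st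
        | _ => st)
      (PySem.Dict.empty, PySem.Dict.empty, PySem.Dict.empty, [], PySem.Dict.empty, 0)
    = pvState entTy l := by
  induction l using List.reverseRecOn with
  | nil => rfl
  | append_singleton l tr ih =>
      have h3l : ∀ tr' ∈ l, tr'.length = 3 := fun tr' h => h3 tr' (List.mem_append_left _ h)
      obtain ⟨h, r, t, rfl⟩ := List.length_eq_three.mp
        (h3 tr (List.mem_append_right _ (List.mem_singleton_self _)))
      rw [List.foldl_append, ih h3l, List.foldl_cons, List.foldl_nil]
      have hs : (pvEnts l).Nodup := PySem.List.nodup_dedup _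
      have hES := pv_ent_step entTy (pvEnts l) hs h
      have hs1 : (PySem.Set.add (pvEnts l) h).Nodup := PySem.Set.nodup_add _ _ hs
      have hES2 := pv_ent_step entTy (PySem.Set.add (pvEnts l) h) hs1 t
      simp only [pvState]
      rw [hES.2.2.1, hES.2.2.2, hES.2.1, hES2.2.2.1, hES2.2.2.2, hES2.2.1, hES2.1, hES.1]
      rw [pv_ents_append, pv_flat_append]
      have hh2 : List.idxOf h ((PySem.Set.add (pvEnts l) h).add t) = List.idxOf h (PySem.Set.add (pvEnts l) h) :=
        pv_idxOf_add _ _ _ ((PySem.Set.mem_add _ _ _).mpr (Or.inr rfl))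
      have hpre : List.map (fun e => ((List.idxOf e ((PySem.Set.add (pvEnts l) h).add t) : Nat) : Int)) (pvFlat l)
          = List.map (fun e => ((List.idxOf e (pvEnts l) : Nat) : Int)) (pvFlat l) :=
        List.map_congr_left (fun e he => by rw [pv_idx_stable₂ _ _ _ _ (pv_mem_ents l e he)])
      simp only [List.map_append, List.map_cons, List.map_nil,
        List.getD_cons_succ, List.getD_cons_zero, hpre, hh2]
      rw [pv_counter_append₂, PySem.Dict.counter_append_singleton,
        pv_trx_congr l h3l (pvEnts l) ((PySem.Set.add (pvEnts l) h).add t)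
          (fun e he => pv_idx_stable₂ _ h t e (pv_mem_ents l e he))]

theorem pv_flatMap_getD (s : List Int) (hs : s.Nodup) (l : List (List Int))
    (hcond : ∀ tr ∈ l, tr.length = 3) (hmem : ∀ e ∈ pvFlat l, e ∈ s) :
    l.flatMap (fun tr => [(pvReidx s).getD (tr.getD 0 0) 0, (pvReidx s).getD (tr.getD 2 0) 0])
    = (pvFlat l).map (fun e => ((s.idxOf e : Nat) : Int)) := by
  induction l with
  | nil => rfl
  | cons tr l ih =>
      obtain ⟨a, b, c, rfl⟩ := List.length_eq_three.mp (hcond _ (List.mem_cons_self ..))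
      have hflat : pvFlat ([a, b, c] :: l) = [a, c] ++ pvFlat l := by
        unfold pvFlat; rw [List.flatMap_cons]
        simp only [List.getD_cons_succ, List.getD_cons_zero]
      have hmem' : ∀ e ∈ pvFlat l, e ∈ s := fun e he =>
        hmem e (hflat ▸ List.mem_append_right _ he)
      have ha : a ∈ s := hmem a (hflat ▸ List.mem_append_left _ (by simp))
      have hc : c ∈ s := hmem c (hflat ▸ List.mem_append_left _ (by simp))
      rw [List.flatMap_cons, hflat, List.map_append,
        ih (fun tr h => hcond tr (List.mem_cons_of_mem _ h)) hmem']
      congr 1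
      simp only [List.getD_cons_succ, List.getD_cons_zero]
      rw [pv_getD_pvReidx s hs a 0, pv_getD_pvReidx s hs c 0, if_pos ha, if_pos hc]
      simp

theorem pv_map_getD (s : List Int) (hs : s.Nodup) (l : List (List Int))
    (hcond : ∀ tr ∈ l, tr.length = 3) (hmem : ∀ e ∈ pvFlat l, e ∈ s) :
    l.map (fun tr => [(pvReidx s).getD (tr.getD 0 0) 0, tr.getD 1 0, (pvReidx s).getD (tr.getD 2 0) 0])
    = l.map (fun tr => match tr with
      | [h, r, t] => [((s.idxOf h : Nat) : Int), r, ((s.idxOf t : Nat) : Int)]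
      | _ => ([] : List Int)) := by
  apply List.map_congr_left
  intro tr htr
  obtain ⟨a, b, c, rfl⟩ := List.length_eq_three.mp (hcond tr htr)
  obtain ⟨ha, hc⟩ := pv_head_mem_flat l a b c htr
  simp only [List.getD_cons_succ, List.getD_cons_zero]
  rw [pv_getD_pvReidx s hs a 0, pv_getD_pvReidx s hs c 0,
    if_pos (hmem a ha), if_pos (hmem c hc)]

theorem pv_A_eq (triples : List (List Int)) (ent_type : List (Int × Int))
    (h3 : ∀ tr ∈ triples, tr.length = 3) :
    process_triples_py triples ent_type =
      ((pvState (PySem.Dict.ofList ent_type) triples).1.items,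
       (pvState (PySem.Dict.ofList ent_type) triples).2.1.items,
       (pvState (PySem.Dict.ofList ent_type) triples).2.2.1.items,
       (pvState (PySem.Dict.ofList ent_type) triples).2.2.2.1,
       (pvState (PySem.Dict.ofList ent_type) triples).2.2.2.2.1.items) := by
  have hinv := pv_invariant (PySem.Dict.ofList ent_type) triples h3
  show ((triples.foldl _ (PySem.Dict.empty, PySem.Dict.empty, PySem.Dict.empty, [], PySem.Dict.empty, 0)).1.items, _, _, _, _) = _
  rw [hinv]

theorem pv_B_eq (triples : List (List Int)) (ent_type : List (Int × Int)) :
    process_triples_py_alt triples ent_type =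
      ((PySem.Dict.counter (triples.flatMap (fun tr =>
          [(pvReidx (pvEnts triples)).getD (tr.getD 0 0) 0,
           (pvReidx (pvEnts triples)).getD (tr.getD 2 0) 0]))).items,
       (PySem.Dict.counter (triples.map (fun tr => tr.getD 1 0))).items,
       (pvTS (PySem.Dict.ofList ent_type) (pvEnts triples)).items,
       triples.map (fun tr =>
          [(pvReidx (pvEnts triples)).getD (tr.getD 0 0) 0, tr.getD 1 0,
           (pvReidx (pvEnts triples)).getD (tr.getD 2 0) 0]),
       (pvReidx (pvEnts triples)).items) := rfl

-- ===== VERDICT (by name: the statement is the Claim_ definition above) =====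
theorem process_triples_py_spec : Claim_equal_process_triples_py := by
  intro triples ent_type hdom hpre
  have h3 : ∀ tr ∈ triples, tr.length = 3 := fun tr h => (hpre tr h).1
  have hs : (pvEnts triples).Nodup := PySem.List.nodup_dedup _
  show process_triples_py triples ent_type = process_triples_py_alt triples ent_type
  rw [pv_A_eq triples ent_type h3, pv_B_eq triples ent_type,
    pv_flatMap_getD (pvEnts triples) hs triples h3 (pv_mem_ents triples),
    pv_map_getD (pvEnts triples) hs triples h3 (pv_mem_ents triples)]
  simp only [pvState]
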